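-- pv_equiv track=rewrite | github.com/EricYang5922/badminton | track/calc_track.py | judge_xy
-- ===== SOURCE A (Python) =====
-- def judge_xy(times, coor_xs, coor_ys):
--     pairs = [(times[i], coor_xs[i], coor_ys[i]) for i in range(len(times))]
--     pairs.sort(key = lambda x : x[0])
--     for k in range(1, 3):
--         trend = 0
--         for i in range(len(pairs) - 1):
--             for j in range(i + 1, len(pairs)):
--                 if abs(pairs[i][k] - pairs[j][k]) > 5:
--                     if pairs[i][k] > pairs[j][k]:
--                         if trend > 0:
--                             return False
--                         else:
--                             trend = -1
--                     else:
--                         if trend < 0: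
--                             return False
--                         else:
--                             trend = 1
--     return True
-- ===== SOURCE B (Python) =====
-- def judge_xy(times, coor_xs, coor_ys):
--     pairs = sorted(zip(times, coor_xs, coor_ys), key=lambda p: p[0])
--
--     def mixed(vals):
--         up = down = False
--         lo = hi = None
--         for v in vals:
--             if lo is None:
--                 lo = hi = v
--             else:
--                 if v > lo + 5:
--                     up = True
--                 if v + 5 < hi:
--                     down = True
--                 if v < lo:
--                     lo = v
--                 if v > hi:
--                     hi = v
--         return up and down
--
--     return not (mixed([p[1] for p in pairs]) or mixed([p[2] for p in pairs]))
-- ===== Notes on version B (the rewrite author's own statement) =====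
-- stated objective: faster
-- what changed: A checks every pair i<j of the time-sorted coordinate sequence with O(n^2) nested loops; B makes one pass per coordinate keeping the running min and max of the prefix, since an up-pair (resp. down-pair) with gap > 5 exists iff some value exceeds the prefix minimum (resp. is below the prefix maximum) by more than 5, and a coordinate is inconsistent iff both kinds exist.
import Mathlib
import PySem

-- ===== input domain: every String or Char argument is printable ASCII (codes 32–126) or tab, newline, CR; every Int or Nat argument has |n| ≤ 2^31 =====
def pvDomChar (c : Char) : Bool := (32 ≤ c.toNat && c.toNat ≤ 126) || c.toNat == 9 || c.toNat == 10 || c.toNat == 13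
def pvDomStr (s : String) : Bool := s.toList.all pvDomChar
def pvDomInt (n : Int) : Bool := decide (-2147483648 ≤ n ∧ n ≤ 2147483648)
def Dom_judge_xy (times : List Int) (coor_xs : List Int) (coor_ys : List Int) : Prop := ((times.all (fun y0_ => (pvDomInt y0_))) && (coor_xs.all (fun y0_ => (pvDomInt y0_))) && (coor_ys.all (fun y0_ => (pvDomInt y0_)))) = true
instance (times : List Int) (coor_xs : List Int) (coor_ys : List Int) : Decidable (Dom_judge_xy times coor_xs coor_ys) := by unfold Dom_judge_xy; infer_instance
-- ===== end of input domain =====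

-- B replaces A's O(n^2) pairwise scan of each time-sorted coordinate by one pass per
-- coordinate tracking the running prefix min/max (objective: faster).

-- ===== PORT A =====
-- inner loop 'for j in range(i+1, len(pairs))': compare pairs[i] (= p) with each later pair,
-- threading the 'trend' variable; 'none' = the Python 'return False' was executed
def pvScanJ (f : Int × Int × Int → Int) (p : Int × Int × Int)
    (rest : List (Int × Int × Int)) (trend : Int) : Option Int :=
  match rest with
  | [] => some trend
  | q :: rest' =>
    if 5 < |f p - f q| then
      if f p > f q then
        if trend > 0 then none else pvScanJ f p rest' (-1)
      else
        if trend < 0 then none else pvScanJ f p rest' 1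
    else pvScanJ f p rest' trend

-- outer loop 'for i in range(len(pairs) - 1)'
def pvScanI (f : Int × Int × Int → Int) (l : List (Int × Int × Int)) (trend : Int) : Option Int :=
  match l with
  | [] => some trend
  | p :: rest =>
    match pvScanJ f p rest trend with
    | none => none
    | some t => pvScanI f rest t

def judge_xy (times : List Int) (coor_xs : List Int) (coor_ys : List Int) : Bool :=
  let pairs := PySem.List.sorted
    ((PySem.List.pyRange 0 (PySem.List.len times) 1).map
      (fun i => (PySem.List.pyGetD times i 0, PySem.List.pyGetD coor_xs i 0, PySem.List.pyGetD coor_ys i 0)))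
    (fun p => p.1) false
  -- 'for k in range(1, 3)': k = 1 selects the x coordinate, k = 2 the y coordinate
  match pvScanI (fun p => p.2.1) pairs 0 with
  | none => false
  | some _ =>
    match pvScanI (fun p => p.2.2) pairs 0 with
    | none => false
    | some _ => true

-- ===== PORT B =====
-- Source B's 'for v in vals' loop after the first element has set lo = hi = v
def pvMixedGo (vals : List Int) (up down : Bool) (lo hi : Int) : Bool :=
  match vals with
  | [] => up && down
  | v :: rest =>
    pvMixedGo rest (up || decide (v > lo + 5)) (down || decide (v + 5 < hi))
      (if v < lo then v else lo) (if v > hi then v else hi)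

def pvMixed (vals : List Int) : Bool :=
  match vals with
  | [] => false
  | v :: rest => pvMixedGo rest false false v v

def judge_xy_alt (times : List Int) (coor_xs : List Int) (coor_ys : List Int) : Bool :=
  let pairs := PySem.List.sorted (times.zip (coor_xs.zip coor_ys)) (fun p => p.1) false
  !(pvMixed (pairs.map (fun p => p.2.1)) || pvMixed (pairs.map (fun p => p.2.2)))

-- ===== PRECONDITION & SPEC =====
-- A indexes coor_xs[i] and coor_ys[i] for every i < len(times): it raises IndexError iff
-- either coordinate list is shorter than times; exactly those inputs are excluded.
def Pre_judge_xy (times : List Int) (coor_xs : List Int) (coor_ys : List Int) : Prop :=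
  times.length ≤ coor_xs.length ∧ times.length ≤ coor_ys.length
instance (times : List Int) (coor_xs : List Int) (coor_ys : List Int) : Decidable (Pre_judge_xy times coor_xs coor_ys) := by unfold Pre_judge_xy; infer_instance

def pvWitness_judge_xy : List Int × List Int × List Int := ([3, 1, 2], [0, 10, 4], [7, 7, 7])

def Spec_judge_xy (times : List Int) (coor_xs : List Int) (coor_ys : List Int) (out : Bool) : Prop := out = judge_xy_alt times coor_xs coor_ys
instance (times : List Int) (coor_xs : List Int) (coor_ys : List Int) (out : Bool) : Decidable (Spec_judge_xy times coor_xs coor_ys out) := by unfold Spec_judge_xy; infer_instance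

-- ===== CLAIM (what is proved, stated in full; the proofs are below) =====
def Claim_equal_judge_xy : Prop := ∀ (times : List Int) (coor_xs : List Int) (coor_ys : List Int), Dom_judge_xy times coor_xs coor_ys → Pre_judge_xy times coor_xs coor_ys → Spec_judge_xy times coor_xs coor_ys (judge_xy times coor_xs coor_ys)


-- ===== LEMMAS AND PROOFS =====

-- "some later value exceeds an earlier one by more than 5" (an up-pair), resp. "some later
-- value is below an earlier one by more than 5" (a down-pair)
def pvU : List Int → Bool
  | [] => false
  | a :: r => r.any (fun b => a + 5 < b) || pvU r

def pvD : List Int → Bool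
  | [] => false
  | a :: r => r.any (fun b => b + 5 < a) || pvD r

lemma pvScanJ_eq (f : Int × Int × Int → Int) (p : Int × Int × Int)
    (rest : List (Int × Int × Int)) (t : Int) :
    pvScanJ f p rest t =
      if ((rest.any (fun q => f p + 5 < f q) && rest.any (fun q => f q + 5 < f p))
          || (decide (t > 0) && rest.any (fun q => f q + 5 < f p))
          || (decide (t < 0) && rest.any (fun q => f p + 5 < f q))) = true
      then none
      else some (if rest.any (fun q => f p + 5 < f q) then 1
                 else if rest.any (fun q => f q + 5 < f p) then -1 else t) := by
  induction rest generalizing t with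
  | nil => simp [pvScanJ]
  | cons q rest' ih =>
    have habs : (5 < |f p - f q|) ↔ (f p + 5 < f q ∨ f q + 5 < f p) := by
      rw [lt_abs]; constructor <;> intro h <;> omega
    simp only [pvScanJ, habs, List.any_cons]
    by_cases hu : f p + 5 < f q <;> by_cases hd : f q + 5 < f p <;>
    by_cases h'u : rest'.any (fun q => decide (f p + 5 < f q)) = true <;>
    by_cases h'd : rest'.any (fun q => decide (f q + 5 < f p)) = true <;>
    by_cases ht0 : t > 0 <;> by_cases ht1 : t < 0 <;>
    first
      | omega
      | (simp [ih, hu, hd, h'u, h'd, ht0, ht1, show ¬ f p > f q from by omega])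
      | (simp [ih, hu, hd, h'u, h'd, ht0, ht1, show f p > f q from by omega])
      | (simp [ih, hu, hd, h'u, h'd, ht0, ht1])

lemma pvScanI_none (f : Int × Int × Int → Int) (l : List (Int × Int × Int)) (t : Int) :
    (pvScanI f l t = none) ↔
      (((pvU (l.map f) && pvD (l.map f))
        || (decide (t > 0) && pvD (l.map f))
        || (decide (t < 0) && pvU (l.map f))) = true) := by
  induction l generalizing t with
  | nil => simp [pvScanI, pvU, pvD]
  | cons p rest ih =>
    simp only [pvScanI, pvScanJ_eq, List.map_cons, pvU, pvD]
    rw [show ((rest.map f).any (fun b => decide (f p + 5 < b)))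
          = rest.any (fun q => decide (f p + 5 < f q)) from by rw [List.any_map]; rfl,
        show ((rest.map f).any (fun b => decide (b + 5 < f p)))
          = rest.any (fun q => decide (f q + 5 < f p)) from by rw [List.any_map]; rfl]
    cases hu : rest.any (fun q => decide (f p + 5 < f q)) <;>
    cases hd : rest.any (fun q => decide (f q + 5 < f p)) <;>
    by_cases ht0 : t > 0 <;> by_cases ht1 : t < 0 <;>
    first
      | omega
      | (simp [ih, ht0, ht1] <;>
         cases hU : pvU (List.map f rest) <;> cases hD : pvD (List.map f rest) <;>
         simp_all)

-- running prefix-min/max characterisation of pvMixedGo's accumulators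
def pvUU (lo : Int) : List Int → Bool
  | [] => false
  | v :: r => decide (v > lo + 5) || pvUU (if v < lo then v else lo) r

def pvDD (hi : Int) : List Int → Bool
  | [] => false
  | v :: r => decide (v + 5 < hi) || pvDD (if v > hi then v else hi) r

lemma any_min_split (r : List Int) (lo v : Int) :
    r.any (fun b => (if v < lo then v else lo) + 5 < b)
      = (r.any (fun b => lo + 5 < b) || r.any (fun b => v + 5 < b)) := by
  induction r with
  | nil => simp
  | cons x r ih =>
    simp only [List.any_cons, ih]
    by_cases h : v < lo <;> by_cases h1 : lo + 5 < x <;> by_cases h2 : v + 5 < x <;>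
    first
      | omega
      | simp [h, h1, h2]

lemma any_max_split (r : List Int) (hi v : Int) :
    r.any (fun b => b + 5 < (if v > hi then v else hi))
      = (r.any (fun b => b + 5 < hi) || r.any (fun b => b + 5 < v)) := by
  induction r with
  | nil => simp
  | cons x r ih =>
    simp only [List.any_cons, ih]
    by_cases h : v > hi <;> by_cases h1 : x + 5 < hi <;> by_cases h2 : x + 5 < v <;>
    first
      | omega
      | simp [h, h1, h2]

lemma pvUU_eq (vals : List Int) (lo : Int) : pvUU lo vals = pvU (lo :: vals) := by
  induction vals generalizing lo with
  | nil => simp [pvUU, pvU]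
  | cons v r ih =>
    simp only [pvUU, ih, pvU, List.any_cons, any_min_split]
    by_cases h : lo + 5 < v <;>
      simp [h] <;>
      cases r.any (fun b => decide (lo + 5 < b)) <;> cases r.any (fun b => decide (v + 5 < b)) <;>
      cases pvU r <;> simp

lemma pvDD_eq (vals : List Int) (hi : Int) : pvDD hi vals = pvD (hi :: vals) := by
  induction vals generalizing hi with
  | nil => simp [pvDD, pvD]
  | cons v r ih =>
    simp only [pvDD, ih, pvD, List.any_cons, any_max_split]
    by_cases h : v + 5 < hi <;> simp [h] <;>
      cases r.any (fun b => decide (b + 5 < hi)) <;> cases r.any (fun b => decide (b + 5 < v)) <;>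
      cases pvD r <;> simp

lemma pvMixedGo_eq (vals : List Int) (up down : Bool) (lo hi : Int) :
    pvMixedGo vals up down lo hi = ((up || pvUU lo vals) && (down || pvDD hi vals)) := by
  induction vals generalizing up down lo hi with
  | nil => simp [pvMixedGo, pvUU, pvDD]
  | cons v r ih =>
    simp only [pvMixedGo, ih, pvUU, pvDD, Bool.or_assoc]

lemma pvMixed_eq (w : List Int) : pvMixed w = (pvU w && pvD w) := by
  cases w with
  | nil => simp [pvMixed, pvU, pvD]
  | cons v rest =>
    simp only [pvMixed, pvMixedGo_eq, pvUU_eq, pvDD_eq, Bool.false_or]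

lemma scan_vs_mixed (f : Int × Int × Int → Int) (l : List (Int × Int × Int)) :
    (pvScanI f l 0 = none) ↔ (pvMixed (l.map f) = true) := by
  rw [pvScanI_none, pvMixed_eq]
  simp

lemma pairs_eq (times coor_xs coor_ys : List Int)
    (hx : times.length ≤ coor_xs.length) (hy : times.length ≤ coor_ys.length) :
    (PySem.List.pyRange 0 (PySem.List.len times) 1).map
      (fun i => (PySem.List.pyGetD times i 0, PySem.List.pyGetD coor_xs i 0, PySem.List.pyGetD coor_ys i 0))
      = times.zip (coor_xs.zip coor_ys) := by
  rw [PySem.List.len_eq, PySem.List.pyRange_one]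
  apply List.ext_getElem
  · simp only [List.length_map, List.length_range, List.length_zip]; omega
  · intro i h1 h2
    have hi : i < times.length := by simpa using h1
    simp only [List.getElem_map, List.getElem_zip]
    simp [PySem.List.pyGetD_natCast, List.getD_eq_getElem, hi,
          show i < coor_xs.length from by omega, show i < coor_ys.length from by omega]

-- ===== VERDICT (by name: the statement is the Claim_ definition above) =====
theorem judge_xy_spec : Claim_equal_judge_xy := by
  intro times coor_xs coor_ys _ hpre
  unfold Spec_judge_xy judge_xy judge_xy_alt
  rw [pairs_eq times coor_xs coor_ys hpre.1 hpre.2]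
  set pairs := PySem.List.sorted (times.zip (coor_xs.zip coor_ys)) (fun p => p.1) false with hp
  rcases h1 : pvScanI (fun p => p.2.1) pairs 0 with _ | t1
  · have := (scan_vs_mixed (fun p => p.2.1) pairs).mp h1
    simp [h1, this]
  · have hm1 : pvMixed (pairs.map (fun p => p.2.1)) = false := by
      rcases hb : pvMixed (pairs.map (fun p => p.2.1)) with _ | _
      · exact hb
      · exact absurd ((scan_vs_mixed (fun p => p.2.1) pairs).mpr hb) (by simp [h1])
    rcases h2 : pvScanI (fun p => p.2.2) pairs 0 with _ | t2
    · have := (scan_vs_mixed (fun p => p.2.2) pairs).mp h2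
      simp [h1, h2, this, hm1]
    · have hm2 : pvMixed (pairs.map (fun p => p.2.2)) = false := by
        rcases hb : pvMixed (pairs.map (fun p => p.2.2)) with _ | _
        · exact hb
        · exact absurd ((scan_vs_mixed (fun p => p.2.2) pairs).mpr hb) (by simp [h2])
      simp [h1, h2, hm1, hm2]
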